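-- pv_equiv track=rewrite | github.com/21-22-IBCS/FlawlessDirector | warmUp.py | checkIE
-- ===== SOURCE A (Python) =====
-- def checkIE(x):
--     x = x.lower()
--     for i in range(0,len(x)-1):
--         if(x[i] == "i" and i == 0 and x[i+1] == "e"):
--             return True
--         elif(x[i] == "i" and x[i+1] == "e" and x[i-1] != "c"):
--             return True
--         elif(x[i] == "e" and i != 0 and x[i-1] == "c" and x[i+1] == "i"):
--             return True
--
--     if(x.count("i") == 0 and x.count("e") == 0):
--         return True
--
--     return False
-- ===== SOURCE B (Python) =====
-- def checkIE(x):
--     x = x.lower()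
--     if "cei" in x:
--         return True
--     if "ie" in x.replace("cie", "cXe"):
--         return True
--     return "i" not in x and "e" not in x
-- ===== Notes on version B (the rewrite author's own statement) =====
-- stated objective: faster
-- what changed: Replaces A's index loop with three i-1/i+1 branches by three staged substring tests: a 'cei' membership test, a rewrite pass that neutralises every after-c 'ie' by replacing 'cie' with 'cXe' followed by a plain 'ie' membership test, and membership tests for the no-i-no-e fallback; the staged substring scans run in C instead of a per-character Python loop.
import Mathlib
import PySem

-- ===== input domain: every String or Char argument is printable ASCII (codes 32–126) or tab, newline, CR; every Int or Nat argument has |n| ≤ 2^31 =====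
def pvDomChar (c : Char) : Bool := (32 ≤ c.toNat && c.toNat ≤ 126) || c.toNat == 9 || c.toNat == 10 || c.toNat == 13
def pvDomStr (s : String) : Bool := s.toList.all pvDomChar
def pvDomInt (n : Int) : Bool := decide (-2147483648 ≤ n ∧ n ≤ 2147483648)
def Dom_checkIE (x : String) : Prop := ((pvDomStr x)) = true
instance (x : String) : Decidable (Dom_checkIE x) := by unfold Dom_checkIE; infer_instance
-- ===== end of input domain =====

-- B replaces A's index loop (with its i-1/i+1 lookups and three branches) by staged substring
-- tests: 'cei' membership, then 'ie' membership after rewriting every 'cie' to 'cXe'; objective: faster (measured).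

-- ===== PORT A =====
-- for i in range(0, len(x)-1): three early-return branches; after the loop the no-i-no-e fallback
def checkIE_go (cs : List Char) : List Int → Bool
  | [] => PySem.Chars.count cs ['i'] == 0 && PySem.Chars.count cs ['e'] == 0
  | i :: rest =>
    if PySem.List.pyGet? cs i == some 'i' && i == 0 && PySem.List.pyGet? cs (i+1) == some 'e' then true
    else if PySem.List.pyGet? cs i == some 'i' && PySem.List.pyGet? cs (i+1) == some 'e'
            && !(PySem.List.pyGet? cs (i-1) == some 'c') then true
    else if PySem.List.pyGet? cs i == some 'e' && !(i == 0) && PySem.List.pyGet? cs (i-1) == some 'c'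
            && PySem.List.pyGet? cs (i+1) == some 'i' then true
    else checkIE_go cs rest

def checkIE (x : String) : Bool :=
  let cs := PySem.Chars.lower x.toList
  checkIE_go cs (PySem.List.pyRange 0 ((cs.length : Int) - 1) 1)

-- ===== PORT B =====
def checkIE_alt (x : String) : Bool :=
  let cs := PySem.Chars.lower x.toList
  if PySem.Chars.isIn ['c', 'e', 'i'] cs then true
  else if PySem.Chars.isIn ['i', 'e'] (PySem.Chars.replace cs ['c', 'i', 'e'] ['c', 'X', 'e']) then true
  else !(PySem.Chars.isIn ['i'] cs) && !(PySem.Chars.isIn ['e'] cs)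

-- ===== PRECONDITION & SPEC =====
def Spec_checkIE (x : String) (out : Bool) : Prop := out = checkIE_alt x
instance (x : String) (out : Bool) : Decidable (Spec_checkIE x out) := by unfold Spec_checkIE; infer_instance

-- ===== CLAIM (what is proved, stated in full; the proofs are below) =====
def Claim_equal_checkIE : Prop := ∀ (x : String), Dom_checkIE x → Spec_checkIE x (checkIE x)

-- ===== LEMMAS AND PROOFS =====

-- the fuel-free shape of replace cs "cie" "cXe"
def rcie : List Char → List Char
  | [] => []
  | c :: t =>
    if ['c', 'i', 'e'].isPrefixOf (c :: t) then 'c' :: 'X' :: 'e' :: rcie (t.drop 2)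
    else c :: rcie t
termination_by l => l.length
decreasing_by all_goals simp

theorem rcie_go : ∀ (fuel : Nat) (l acc : List Char), l.length ≤ fuel →
    PySem.Chars.replace.go ['c', 'i', 'e'] ['c', 'X', 'e'] fuel l acc = acc.reverse ++ rcie l := by
  intro fuel
  induction fuel with
  | zero =>
    intro l acc h
    cases l with
    | nil => simp [PySem.Chars.replace.go, rcie]
    | cons x t => simp at h
  | succ n ih =>
    intro l acc h
    cases l with
    | nil => simp [PySem.Chars.replace.go, rcie]
    | cons x t =>
      have step : PySem.Chars.replace.go ['c', 'i', 'e'] ['c', 'X', 'e'] (n + 1) (x :: t) acc =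
          if ['c', 'i', 'e'].isPrefixOf (x :: t) = true then
            PySem.Chars.replace.go ['c', 'i', 'e'] ['c', 'X', 'e'] n
              ((x :: t).drop ['c', 'i', 'e'].length) (['c', 'X', 'e'].reverse ++ acc)
          else PySem.Chars.replace.go ['c', 'i', 'e'] ['c', 'X', 'e'] n t (x :: acc) := rfl
      rw [step, rcie]
      simp only [List.length_cons] at h
      by_cases hp : ['c', 'i', 'e'].isPrefixOf (x :: t) = true
      · rw [if_pos hp, if_pos hp]
        have hd : ((x :: t).drop ['c', 'i', 'e'].length) = t.drop 2 := by simp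
        rw [hd, ih (t.drop 2) _ (by simp; omega)]
        simp
      · rw [if_neg hp, if_neg hp, ih t _ (by omega)]
        simp

theorem replace_eq_rcie (cs : List Char) :
    PySem.Chars.replace cs ['c', 'i', 'e'] ['c', 'X', 'e'] = rcie cs := by
  rw [PySem.Chars.replace]
  simp [rcie_go cs.length cs [] le_rfl]

-- "ie" at list position k
def ieAt (cs : List Char) (k : Nat) : Prop := cs[k]? = some 'i' ∧ cs[k+1]? = some 'e'

-- B's good-"ie" hit at position k (prev = what precedes cs[0])
def pattB (prev : Option Char) (cs : List Char) (k : Nat) : Prop :=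
  cs[k]? = some 'i' ∧ cs[k+1]? = some 'e' ∧ (if k = 0 then prev else cs[k-1]?) ≠ some 'c'

-- A's three loop branches at index i, as one boolean
def pattA (cs : List Char) (i : Int) : Bool :=
  (PySem.List.pyGet? cs i == some 'i' && i == 0 && PySem.List.pyGet? cs (i+1) == some 'e') ||
  (PySem.List.pyGet? cs i == some 'i' && PySem.List.pyGet? cs (i+1) == some 'e'
      && !(PySem.List.pyGet? cs (i-1) == some 'c')) ||
  (PySem.List.pyGet? cs i == some 'e' && !(i == 0) && PySem.List.pyGet? cs (i-1) == some 'c'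
      && PySem.List.pyGet? cs (i+1) == some 'i')

theorem ite3 (b1 b2 b3 r : Bool) :
    (if b1 = true then true else if b2 = true then true else if b3 = true then true else r) =
      (b1 || b2 || b3 || r) := by
  cases b1 <;> cases b2 <;> cases b3 <;> simp

theorem goA_eq (cs : List Char) (l : List Int) :
    checkIE_go cs l =
      (l.any (pattA cs) ||
        (PySem.Chars.count cs ['i'] == 0 && PySem.Chars.count cs ['e'] == 0)) := by
  induction l with
  | nil => simp [checkIE_go]
  | cons i rest ih =>
    simp only [checkIE_go, List.any_cons, ih, pattA]
    rw [ite3]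
    simp [Bool.or_assoc]

theorem prefix_shape {c : Char} {t : List Char} (hp : ['c', 'i', 'e'].isPrefixOf (c :: t) = true) :
    c = 'c' ∧ t[0]? = some 'i' ∧ t[1]? = some 'e' := by
  rw [List.isPrefixOf_iff_prefix, List.cons_prefix_cons] at hp
  obtain ⟨hc, hpre⟩ := hp
  obtain ⟨u, rfl⟩ := hpre
  exact ⟨hc.symm, by simp⟩

theorem rcie_head (l : List Char) : (rcie l)[0]? = l[0]? := by
  cases l with
  | nil => simp [rcie]
  | cons c t =>
    rw [rcie]
    by_cases hp : ['c', 'i', 'e'].isPrefixOf (c :: t) = true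
    · rw [if_pos hp]
      simp [(prefix_shape hp).1]
    · rw [if_neg hp]
      simp

-- pointwise: r has "ie" at k iff cs has a good "ie" at k
theorem rcie_ieAt (cs : List Char) : ∀ (k : Nat), ieAt (rcie cs) k ↔ pattB none cs k := by
  induction cs using rcie.induct with
  | case1 =>
    intro k
    unfold ieAt pattB
    simp [rcie]
  | case2 c t hp ih =>
    intro k
    rw [rcie, if_pos hp]
    obtain ⟨hc, hi, he⟩ := prefix_shape hp
    subst hc
    obtain ⟨t', rfl⟩ : ∃ t', t = 'i' :: 'e' :: t' := by
      cases t with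
      | nil => simp at hi
      | cons a t1 =>
        cases t1 with
        | nil => simp at he
        | cons b t2 =>
          simp only [List.getElem?_cons_zero, List.getElem?_cons_succ, Option.some.injEq] at hi he
          exact ⟨t2, by rw [hi, he]⟩
    have hdrop : ('i' :: 'e' :: t').drop 2 = t' := by simp
    rw [hdrop] at ih ⊢
    match k with
    | 0 => unfold ieAt pattB; simp
    | 1 => unfold ieAt pattB; simp
    | 2 => unfold ieAt pattB; simp
    | (j+3) =>
      have lhs : ieAt ('c' :: 'X' :: 'e' :: rcie t') (j+3) ↔ ieAt (rcie t') j := by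
        unfold ieAt; simp
      rw [lhs, ih j]
      unfold pattB
      match j with
      | 0 => simp
      | (j'+1) => simp
  | case3 c t hp ih =>
    intro k
    rw [rcie, if_neg hp]
    match k with
    | 0 =>
      unfold ieAt pattB
      simp [rcie_head t]
    | (j+1) =>
      have lhs : ieAt (c :: rcie t) (j+1) ↔ ieAt (rcie t) j := by
        unfold ieAt; simp
      rw [lhs, ih j]
      unfold pattB
      match j with
      | 0 =>
        have hcne : t[0]? = some 'i' → t[1]? = some 'e' → c ≠ 'c' := by
          intro h1 h2 hcc
          apply hp
          rw [List.isPrefixOf_iff_prefix]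
          rcases t with _ | ⟨a, t1⟩
          · simp at h1
          rcases t1 with _ | ⟨b, t2⟩
          · simp at h2
          simp only [List.getElem?_cons_zero, List.getElem?_cons_succ,
            Option.some.injEq] at h1 h2
          simp [List.cons_prefix_cons, hcc, h1, h2]
        simp only [Nat.add_sub_cancel, List.getElem?_cons_zero]
        norm_num
        intro h1 h2
        simp [hcne h1 h2]
      | (j'+1) => simp

theorem prefix2 (a b : Char) (l : List Char) :
    [a, b] <+: l ↔ l[0]? = some a ∧ l[1]? = some b := by
  match l with
  | [] => simp
  | [x] => simp [List.cons_prefix_cons]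
  | x :: y :: t =>
    simp only [List.cons_prefix_cons, List.getElem?_cons_zero, List.getElem?_cons_succ,
      Option.some.injEq, List.nil_prefix, and_true]
    constructor
    · rintro ⟨h1, h2⟩; exact ⟨h1.symm, h2.symm⟩
    · rintro ⟨h1, h2⟩; exact ⟨h1.symm, h2.symm⟩

theorem prefix3 (a b c : Char) (l : List Char) :
    [a, b, c] <+: l ↔ l[0]? = some a ∧ l[1]? = some b ∧ l[2]? = some c := by
  match l with
  | [] => simp
  | [x] => simp [List.cons_prefix_cons]
  | [x, y] => simp [List.cons_prefix_cons]
  | x :: y :: z :: t =>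
    simp only [List.cons_prefix_cons, List.getElem?_cons_zero, List.getElem?_cons_succ,
      Option.some.injEq, List.nil_prefix, and_true]
    constructor
    · rintro ⟨h1, h2, h3⟩; exact ⟨h1.symm, h2.symm, h3.symm⟩
    · rintro ⟨h1, h2, h3⟩; exact ⟨h1.symm, h2.symm, h3.symm⟩

theorem ie_iff (s : List Char) :
    PySem.Chars.isIn ['i', 'e'] s = true ↔ ∃ k : Nat, ieAt s k := by
  rw [← PySem.Chars.exists_prefix_drop_iff_isIn]
  unfold ieAt
  constructor
  · rintro ⟨j, h⟩
    rw [prefix2] at h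
    exact ⟨j, by simpa [List.getElem?_drop] using h⟩
  · rintro ⟨j, h⟩
    exact ⟨j, by rw [prefix2]; simpa [List.getElem?_drop] using h⟩

theorem cei_iff (cs : List Char) :
    PySem.Chars.isIn ['c', 'e', 'i'] cs = true ↔
      ∃ j : Nat, cs[j]? = some 'c' ∧ cs[j+1]? = some 'e' ∧ cs[j+2]? = some 'i' := by
  rw [← PySem.Chars.exists_prefix_drop_iff_isIn]
  constructor
  · rintro ⟨j, h⟩
    rw [prefix3] at h
    exact ⟨j, by simpa [List.getElem?_drop] using h⟩
  · rintro ⟨j, h⟩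
    exact ⟨j, by rw [prefix3]; simpa [List.getElem?_drop] using h⟩

theorem prefix1 (c : Char) (l : List Char) : [c] <+: l ↔ l[0]? = some c := by
  match l with
  | [] => simp
  | x :: t => simp [List.cons_prefix_cons, eq_comm]

theorem isIn_singleton (c : Char) (cs : List Char) :
    PySem.Chars.isIn [c] cs = true ↔ c ∈ cs := by
  rw [← PySem.Chars.exists_prefix_drop_iff_isIn]
  constructor
  · rintro ⟨j, h⟩
    rw [prefix1] at h
    simp only [List.getElem?_drop] at h
    exact List.mem_of_getElem? h
  · intro hm
    obtain ⟨j, hj, hget⟩ := List.getElem_of_mem hm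
    exact ⟨j, by rw [prefix1]; simp [hj, hget]⟩

theorem count_go_singleton (c : Char) :
    ∀ (fuel : Nat) (l : List Char) (acc : Nat), l.length ≤ fuel →
      PySem.Chars.count.go [c] fuel l acc = acc + l.count c := by
  intro fuel
  induction fuel with
  | zero =>
    intro l acc h
    cases l with
    | nil => rfl
    | cons x t => simp at h
  | succ n ih =>
    intro l acc h
    cases l with
    | nil => rfl
    | cons x t =>
      have step : PySem.Chars.count.go [c] (n + 1) (x :: t) acc =
          if [c].isPrefixOf (x :: t) = true then
            PySem.Chars.count.go [c] n ((x :: t).drop [c].length) (acc + 1)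
          else PySem.Chars.count.go [c] n t acc := rfl
      rw [step]
      simp only [List.length_cons] at h
      by_cases hx : c = x
      · rw [if_pos (by simp [List.isPrefixOf, hx]), List.length_singleton, List.drop_one,
          List.tail_cons, ih t (acc + 1) (by omega), List.count_cons]
        simp [hx]
        omega
      · rw [if_neg (by simp [List.isPrefixOf]; exact hx), ih t acc (by omega),
          List.count_cons]
        simp [Ne.symm hx]

theorem count_singleton (c : Char) (cs : List Char) :
    PySem.Chars.count cs [c] = cs.count c := by
  rw [PySem.Chars.count]
  simp [count_go_singleton c cs.length cs 0 le_rfl]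

theorem getElem?_lt {α : Type} (l : List α) (i : Nat) (a : α) (h : l[i]? = some a) :
    i < l.length := by
  rcases List.getElem?_eq_some_iff.mp h with ⟨hlt, _⟩
  exact hlt

theorem pyGet?_succ_nat (cs : List Char) (j : Nat) :
    PySem.List.pyGet? cs ((j : Int) + 1) = cs[j + 1]? := by
  have : ((j : Int) + 1) = ((j + 1 : Nat) : Int) := by omega
  rw [this, PySem.List.pyGet?_natCast]

theorem cast_succ_sub_one (j : Nat) : ((j + 1 : Nat) : Int) - 1 = ((j : Nat) : Int) := by
  omega

theorem mainIff (cs : List Char) :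
    (∃ i ∈ PySem.List.pyRange 0 ((cs.length : Int) - 1) 1, pattA cs i = true) ↔
      ((∃ j : Nat, cs[j]? = some 'c' ∧ cs[j+1]? = some 'e' ∧ cs[j+2]? = some 'i') ∨
        ∃ i : Nat, pattB none cs i) := by
  constructor
  · rintro ⟨i, hmem, hp⟩
    rw [PySem.List.mem_pyRange_one] at hmem
    obtain ⟨k, rfl⟩ : ∃ k : Nat, i = (k : Int) := ⟨i.toNat, (Int.toNat_of_nonneg hmem.1).symm⟩
    simp only [pattA, Bool.or_eq_true, Bool.and_eq_true, beq_iff_eq, Bool.not_eq_true',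
      beq_eq_false_iff_ne, ne_eq, PySem.List.pyGet?_natCast, pyGet?_succ_nat] at hp
    rcases hp with (⟨⟨h1, h0⟩, h2⟩ | ⟨⟨h1, h2⟩, h3⟩) | ⟨⟨⟨h1, h0⟩, h2⟩, h3⟩
    · have hk : k = 0 := by exact_mod_cast h0
      subst hk
      exact Or.inr ⟨0, h1, h2, by simp⟩
    · cases k with
      | zero => exact Or.inr ⟨0, h1, h2, by simp⟩
      | succ j =>
        rw [cast_succ_sub_one, PySem.List.pyGet?_natCast] at h3
        exact Or.inr ⟨j + 1, h1, h2, by simpa [pattB] using h3⟩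
    · have hk : k ≠ 0 := by exact_mod_cast h0
      cases k with
      | zero => exact absurd rfl hk
      | succ j =>
        rw [cast_succ_sub_one, PySem.List.pyGet?_natCast] at h2
        exact Or.inl ⟨j, h2, h1, h3⟩
  · rintro (⟨j, hc, he, hi⟩ | ⟨k, h1, h2, h3⟩)
    · refine ⟨((j + 1 : Nat) : Int), ?_, ?_⟩
      · rw [PySem.List.mem_pyRange_one]
        have := getElem?_lt cs (j + 2) 'i' hi
        exact ⟨Int.natCast_nonneg _, by omega⟩
      · simp only [pattA, Bool.or_eq_true, Bool.and_eq_true, beq_iff_eq, Bool.not_eq_true',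
          beq_eq_false_iff_ne, ne_eq, PySem.List.pyGet?_natCast, pyGet?_succ_nat]
        refine Or.inr ⟨⟨⟨he, by omega⟩, ?_⟩, hi⟩
        rw [cast_succ_sub_one, PySem.List.pyGet?_natCast]
        exact hc
    · obtain ⟨h1, h2, h3⟩ : cs[k]? = some 'i' ∧ cs[k+1]? = some 'e' ∧
          (if k = 0 then (none : Option Char) else cs[k-1]?) ≠ some 'c' := ⟨h1, h2, h3⟩
      refine ⟨((k : Nat) : Int), ?_, ?_⟩
      · rw [PySem.List.mem_pyRange_one]
        have := getElem?_lt cs (k + 1) 'e' h2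
        exact ⟨Int.natCast_nonneg _, by omega⟩
      · simp only [pattA, Bool.or_eq_true, Bool.and_eq_true, beq_iff_eq, Bool.not_eq_true',
          beq_eq_false_iff_ne, ne_eq, PySem.List.pyGet?_natCast, pyGet?_succ_nat]
        cases k with
        | zero => exact Or.inl (Or.inl ⟨⟨h1, by simp⟩, h2⟩)
        | succ j =>
          refine Or.inl (Or.inr ⟨⟨h1, h2⟩, ?_⟩)
          rw [cast_succ_sub_one, PySem.List.pyGet?_natCast]
          simpa using h3

-- ===== VERDICT (by name: the statement is the Claim_ definition above) =====
theorem checkIE_spec : Claim_equal_checkIE := by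
  intro x _
  unfold Spec_checkIE checkIE checkIE_alt
  simp only []
  set cs := PySem.Chars.lower x.toList with hcs
  rw [goA_eq, replace_eq_rcie]
  split_ifs with h1 h2
  · simp only [Bool.or_eq_true, List.any_eq_true]
    refine Or.inl ((mainIff cs).mpr (Or.inl ?_))
    exact (cei_iff cs).mp h1
  · simp only [Bool.or_eq_true, List.any_eq_true]
    refine Or.inl ((mainIff cs).mpr (Or.inr ?_))
    obtain ⟨k, hk⟩ := (ie_iff (rcie cs)).mp h2
    exact ⟨k, (rcie_ieAt cs k).mp hk⟩
  · rw [Bool.eq_iff_iff]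
    simp only [Bool.or_eq_true, List.any_eq_true, Bool.and_eq_true, beq_iff_eq,
      Bool.not_eq_true', Bool.eq_false_iff, ne_eq, count_singleton, List.count_eq_zero,
      isIn_singleton]
    constructor
    · rintro (hmain | h)
      · rcases (mainIff cs).mp hmain with hcei | ⟨k, hk⟩
        · exact absurd ((cei_iff cs).mpr hcei) (by simp [h1])
        · exact absurd ((ie_iff (rcie cs)).mpr ⟨k, (rcie_ieAt cs k).mpr hk⟩) (by simp [h2])
      · exact h
    · intro h
      exact Or.inr h
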